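-- pv_equiv track=rewrite | github.com/zhimaAi/ChatClaw | .cursor/skills/i18n-check/scripts/import_translations.py | to_nested_format
-- ===== SOURCE A (Python) =====
-- def to_nested_format(flat_obj):
--     """Convert flat dict to nested TS format.
--
--     NOTE:
--     - This function assumes `value` is a correct Python str in UTF-8.
--     - We ONLY escape double quotes for TS string literals.
--     - We deliberately avoid blindly doubling backslashes to prevent turning
--       `\"` into `\\\"` in the source file.
--     """
--     lines = ['export default {']
--     nested = {}
--     for key, value in flat_obj.items():
--         parts = key.split('.')
--         current = nested
--         for i, part in enumerate(parts[:-1]):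
--             if part not in current:
--                 current[part] = {}
--             if isinstance(current[part], str):
--                 current[part] = {'_value': current[part]}
--             current = current[part]
--         if parts[-1] in current and isinstance(current[parts[-1]], dict) and not isinstance(value, dict):
--             current[parts[-1]]['_value'] = value
--         else:
--             current[parts[-1]] = value
--
--     def escape_ts_string(value: str) -> str:
--         # Only escape double quotes; keep backslashes as-is to avoid over-escaping
--         return str(value).replace('"', '\\"')
--
--     def print_object(obj, indent=1):
--         indent_str = '  ' * indent
--         for key, value in obj.items():
--             if key == '_value':
--                 continue
--             if isinstance(value, dict):
--                 if '_value' in value and len(value) == 1: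
--                     escaped_value = escape_ts_string(value['_value'])
--                     lines.append(f'{indent_str}{key}: "{escaped_value}",')
--                 else:
--                     lines.append(f'{indent_str}{key}: {{')
--                     print_object(value, indent + 1)
--                     lines.append(f'{indent_str}}},')
--             else:
--                 escaped_value = escape_ts_string(value)
--                 lines.append(f'{indent_str}{key}: "{escaped_value}",')
--
--     print_object(nested)
--     lines.append('}')
--     lines.append('')
--     return '\n'.join(lines)
-- ===== SOURCE B (Python) =====
-- def to_nested_format(flat_obj):
--     """Purely functional re-implementation: the nested object is an association
--     list built by a recursive insert (no mutation), and rendering concatenates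
--     string chunks directly instead of collecting lines."""
--
--     def set_value(children, value):
--         # overwrite '_value' in place, else append it
--         for i, (k, _) in enumerate(children):
--             if k == '_value':
--                 return children[:i] + [('_value', value)] + children[i + 1:]
--         return children + [('_value', value)]
--
--     def insert(obj, parts, value):
--         head, rest = parts[0], parts[1:]
--         for i, (k, node) in enumerate(obj):
--             if k == head:
--                 if rest:
--                     child = node if isinstance(node, list) else [('_value', node)]
--                     return obj[:i] + [(head, insert(child, rest, value))] + obj[i + 1:]
--                 if isinstance(node, list):
--                     return obj[:i] + [(head, set_value(node, value))] + obj[i + 1:]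
--                 return obj[:i] + [(head, value)] + obj[i + 1:]
--             # key mismatch: keep scanning (splice keeps order)
--         if rest:
--             return obj + [(head, insert([], rest, value))]
--         return obj + [(head, value)]
--
--     def render(obj, indent):
--         pad = '  ' * indent
--         out = ''
--         for k, node in obj:
--             if k == '_value':
--                 continue
--             if isinstance(node, list) and not (len(node) == 1 and node[0][0] == '_value'):
--                 out += pad + k + ': {\n' + render(node, indent + 1) + pad + '},\n'
--             else:
--                 v = node[0][1] if isinstance(node, list) else node
--                 out += pad + k + ': "' + v.replace('"', '\\"') + '",\n'
--         return out
--
--     nested = []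
--     for key, value in flat_obj.items():
--         nested = insert(nested, key.split('.'), value)
--     return 'export default {\n' + render(nested, 1) + '}\n'
-- ===== Notes on version B (the rewrite author's own statement) =====
-- stated objective: alternative
-- what changed: The mutable pointer-walk dict building and the recursive line-collecting print_object are replaced by a purely functional recursive insert into an association-list tree and a renderer that concatenates the output string directly.
import Mathlib
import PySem

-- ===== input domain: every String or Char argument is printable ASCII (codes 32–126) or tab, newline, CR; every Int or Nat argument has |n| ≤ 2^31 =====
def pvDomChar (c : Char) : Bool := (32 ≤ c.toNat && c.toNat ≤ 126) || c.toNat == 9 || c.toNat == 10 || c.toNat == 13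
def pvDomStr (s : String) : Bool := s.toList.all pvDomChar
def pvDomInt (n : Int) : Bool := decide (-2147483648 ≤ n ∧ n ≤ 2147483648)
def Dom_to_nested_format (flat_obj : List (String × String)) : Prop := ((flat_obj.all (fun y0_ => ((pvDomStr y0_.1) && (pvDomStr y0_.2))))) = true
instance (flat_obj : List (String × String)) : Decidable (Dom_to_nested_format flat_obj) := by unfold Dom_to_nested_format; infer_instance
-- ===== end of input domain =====

-- B rebuilds the nested object purely functionally (recursive insert into an
-- association-list tree, no pointer mutation) and renders it by direct string
-- concatenation instead of collecting a list of lines (objective: alternative).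

-- ===== PORT A =====
-- A's nested dict: values are str or dict; the object keeps Python-dict
-- insertion order with overwrite-in-place.
mutual
inductive TVal : Type where
  | s : String → TVal
  | o : TObj → TVal
  deriving DecidableEq, Repr
inductive TObj : Type where
  | nil : TObj
  | cons : String → TVal → TObj → TObj
  deriving DecidableEq, Repr
end

-- `part in current`
def objContains : TObj → String → Bool
  | TObj.nil, _ => false
  | TObj.cons k _ r, x => k == x || objContains r x

-- `current[part]` (none = absent)
def objGet? : TObj → String → Option TVal
  | TObj.nil, _ => none
  | TObj.cons k v r, x => if k == x then some v else objGet? r x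

-- `current[part] = v` (overwrite keeps position, new key appends — Python dict)
def objSet : TObj → String → TVal → TObj
  | TObj.nil, x, v => TObj.cons x v TObj.nil
  | TObj.cons k w r, x, v => if k == x then TObj.cons k v r else TObj.cons k w (objSet r x v)

-- `len(value)`
def objSize : TObj → Nat
  | TObj.nil => 0
  | TObj.cons _ _ r => objSize r + 1

-- the inner `for part in parts[:-1]: …` walk plus the final-part assignment,
-- written as recursion on the path (Python mutates `current` in place)
def insertPath : TObj → List String → String → TObj
  | o, [], _ => o   -- unreachable: str.split always returns a nonempty list
  | o, [last], v =>
      match objGet? o last with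
      | some (TVal.o d) => objSet o last (TVal.o (objSet d "_value" (TVal.s v)))
      | _ => objSet o last (TVal.s v)
  | o, part :: rest₀ :: rest, v =>
      let child : TObj :=
        match objGet? o part with
        | none => TObj.nil                                   -- current[part] = {}
        | some (TVal.s s) => TObj.cons "_value" (TVal.s s) TObj.nil  -- {'_value': current[part]}
        | some (TVal.o d) => d
      objSet o part (TVal.o (insertPath child (rest₀ :: rest) v))

-- `for key, value in flat_obj.items(): …` (flat_obj is a Python dict)
def buildNested (items : List (String × String)) : TObj :=
  -- key.split('.'): split? is always `some` here since the separator "." is nonempty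
  items.foldl (fun acc kv => insertPath acc ((PySem.Str.split? kv.1 ".").getD []) kv.2) TObj.nil

-- escape_ts_string (only double quotes)
def escapeTs (v : String) : String := PySem.Str.replace v "\"" "\\\""

-- Python repr of one str (hand port of CPython's repr, exact on the printable
-- ASCII + tab/newline/CR domain: quote choice, backslash/quote/\t/\n/\r escapes)
def pyReprStr (s : String) : String :=
  let cs := s.toList
  let q : Char := if cs.contains '\'' && !cs.contains '"' then '"' else '\''
  String.ofList (q :: cs.flatMap (fun c =>
    if c = '\\' then ['\\', '\\']
    else if c = q then ['\\', q]
    else if c = '\t' then ['\\', 't']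
    else if c = '\n' then ['\\', 'n']
    else if c = '\r' then ['\\', 'r']
    else [c]) ++ [q])

-- Python str() of a nested-dict value (str(value) inside escape_ts_string can
-- receive a dict when a key uses '_value' as an intermediate segment); hand
-- port of dict repr: "{k: v, …}" with repr'd keys/values, exact on the domain.
mutual
def pyStrVal : TVal → String
  | TVal.s s => s
  | TVal.o d => "{" ++ reprBody d ++ "}"
def reprVal : TVal → String
  | TVal.s s => pyReprStr s
  | TVal.o d => "{" ++ reprBody d ++ "}"
def reprBody : TObj → String
  | TObj.nil => ""
  | TObj.cons k v TObj.nil => pyReprStr k ++ ": " ++ reprVal v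
  | TObj.cons k v (TObj.cons k' v' r) =>
      pyReprStr k ++ ": " ++ reprVal v ++ ", " ++ reprBody (TObj.cons k' v' r)
end

-- '  ' * indent
def indentStr (n : Nat) : String := String.ofList (List.replicate (2 * n) ' ')

-- value['_value'] of a leaf object (present by the leaf test)
def getValue (d : TObj) : TVal :=
  match objGet? d "_value" with
  | some x => x
  | none => TVal.s ""   -- unreachable: guarded by objContains

def lineLeaf (i : Nat) (k v : String) : String :=
  indentStr i ++ k ++ ": \"" ++ escapeTs v ++ "\","

-- print_object's recursion, appending to `lines`
def printObj : TObj → Nat → List String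
  | TObj.nil, _ => []
  | TObj.cons k v rest, ind =>
    (if k = "_value" then [] else
      match v with
      | TVal.s sv => [lineLeaf ind k sv]
      | TVal.o d =>
        if objContains d "_value" && objSize d == 1 then
          [lineLeaf ind k (pyStrVal (getValue d))]
        else
          (indentStr ind ++ k ++ ": {") :: (printObj d (ind + 1) ++ [indentStr ind ++ "},"]))
    ++ printObj rest ind

def to_nested_format (flat_obj : List (String × String)) : String :=
  let nested := buildNested (PySem.Dict.ofList flat_obj).items
  let lines := "export default {" :: (printObj nested 1 ++ ["}", ""])
  PySem.Str.join "\n" lines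

-- ===== PORT B =====
-- B's tree, fused into ONE inductive: an object is a list of entries, each
-- entry tagged as a string entry or an object entry (Source B's str-or-list nodes).
inductive BEnt : Type where
  | nilO : BEnt                           -- empty object
  | strE : String → String → BEnt → BEnt  -- key ↦ string, rest of the entries
  | objE : String → BEnt → BEnt → BEnt    -- key ↦ child object, rest
  deriving DecidableEq, Repr

-- set_value: overwrite '_value' in place, else append it
def bSetValue : BEnt → String → BEnt
  | BEnt.nilO, v => BEnt.strE "_value" v BEnt.nilO
  | BEnt.strE k s r, v =>
      if k == "_value" then BEnt.strE "_value" v r else BEnt.strE k s (bSetValue r v)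
  | BEnt.objE k d r, v =>
      if k == "_value" then BEnt.strE "_value" v r else BEnt.objE k d (bSetValue r v)

-- insert: scan for the head key (the splice obj[:i] ++ [..] ++ obj[i+1:] keeps
-- order); on a miss append; recurse into the child on a longer path
def bInsert : BEnt → List String → String → BEnt
  | o, [], _ => o   -- unreachable: str.split never yields an empty parts list
  | BEnt.nilO, [h], v => BEnt.strE h v BEnt.nilO
  | BEnt.nilO, h :: r1 :: rs, v => BEnt.objE h (bInsert BEnt.nilO (r1 :: rs) v) BEnt.nilO
  | BEnt.strE k s r, [h], v =>
      if k == h then BEnt.strE k v r else BEnt.strE k s (bInsert r [h] v)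
  | BEnt.objE k d r, [h], v =>
      if k == h then BEnt.objE k (bSetValue d v) r else BEnt.objE k d (bInsert r [h] v)
  | BEnt.strE k s r, h :: r1 :: rs, v =>
      if k == h then BEnt.objE k (bInsert (BEnt.strE "_value" s BEnt.nilO) (r1 :: rs) v) r
      else BEnt.strE k s (bInsert r (h :: r1 :: rs) v)
  | BEnt.objE k d r, h :: r1 :: rs, v =>
      if k == h then BEnt.objE k (bInsert d (r1 :: rs) v) r
      else BEnt.objE k d (bInsert r (h :: r1 :: rs) v)
  termination_by o parts _ => (parts.length, sizeOf o)

-- leaf test: len(node) == 1 and node[0][0] == '_value'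
def bIsLeaf : BEnt → Bool
  | BEnt.strE k _ BEnt.nilO => k == "_value"
  | BEnt.objE k _ BEnt.nilO => k == "_value"
  | _ => false

-- node[0][1] of a leaf-shaped child list
def bLeafVal : BEnt → String
  | BEnt.strE _ s _ => s
  | _ => ""   -- an object there makes the Python raise; outside Pre_

-- render: one string accumulated by concatenation (out += chunk)
def bRender : BEnt → Nat → String
  | BEnt.nilO, _ => ""
  | BEnt.strE k s r, ind =>
    (if k == "_value" then "" else
      String.ofList (List.replicate (2 * ind) ' ') ++ k ++ ": \"" ++
        PySem.Str.replace s "\"" "\\\"" ++ "\",\n")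
    ++ bRender r ind
  | BEnt.objE k d r, ind =>
    (if k == "_value" then "" else
      if !bIsLeaf d then
        String.ofList (List.replicate (2 * ind) ' ') ++ k ++ ": {\n" ++ bRender d (ind + 1) ++
          String.ofList (List.replicate (2 * ind) ' ') ++ "},\n"
      else
        String.ofList (List.replicate (2 * ind) ' ') ++ k ++ ": \"" ++
          PySem.Str.replace (bLeafVal d) "\"" "\\\"" ++ "\",\n")
    ++ bRender r ind

def to_nested_format_alt (flat_obj : List (String × String)) : String :=
  let nested := (PySem.Dict.ofList flat_obj).items.foldl
    (fun acc kv => bInsert acc ((PySem.Str.split? kv.1 ".").getD []) kv.2) BEnt.nilO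
  "export default {\n" ++ bRender nested 1 ++ "}\n"

-- ===== PRECONDITION & SPEC =====
-- Pre_ excludes inputs where some key uses '_value' as a NON-FINAL dotted
-- segment: there A stringifies an internal Python dict (its repr) into the
-- output, and B's renderer raises (AttributeError) when such a node is the
-- only child of its parent.
def Pre_to_nested_format (flat_obj : List (String × String)) : Prop :=
  (flat_obj.all (fun kv =>
    !(((PySem.Str.split? kv.1 ".").getD []).dropLast.contains "_value"))) = true
instance (flat_obj : List (String × String)) : Decidable (Pre_to_nested_format flat_obj) := by
  unfold Pre_to_nested_format; infer_instance

def pvWitness_to_nested_format : (List (String × String)) :=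
  [("app.title", "ChatClaw"), ("app", "x"), ("ok", "say \"hi\"")]

def Spec_to_nested_format (flat_obj : List (String × String)) (out : String) : Prop := out = to_nested_format_alt flat_obj
instance (flat_obj : List (String × String)) (out : String) : Decidable (Spec_to_nested_format flat_obj out) := by unfold Spec_to_nested_format; infer_instance

-- ===== CLAIM (what is proved, stated in full; the proofs are below) =====
def Claim_equal_to_nested_format : Prop := ∀ (flat_obj : List (String × String)), Dom_to_nested_format flat_obj → Pre_to_nested_format flat_obj → Spec_to_nested_format flat_obj (to_nested_format flat_obj)

-- ===== LEMMAS AND PROOFS =====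

-- translation from A's tree to B's fused entry tree
def trO : TObj → BEnt
  | TObj.nil => BEnt.nilO
  | TObj.cons k (TVal.s s) r => BEnt.strE k s (trO r)
  | TObj.cons k (TVal.o d) r => BEnt.objE k (trO d) (trO r)

-- the built tree is "good": no '_value' key ever maps to an object
mutual
def goodV : TVal → Bool
  | TVal.s _ => true
  | TVal.o d => goodO d
def goodO : TObj → Bool
  | TObj.nil => true
  | TObj.cons k v r =>
      (match v with
       | TVal.s _ => true
       | TVal.o _ => !(k == "_value")) && goodV v && goodO r
end

theorem trO_setValue : ∀ (d : TObj) (v : String),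
    trO (objSet d "_value" (TVal.s v)) = bSetValue (trO d) v
  | TObj.nil, v => by simp [objSet, trO, bSetValue]
  | TObj.cons k n r, v => by
    by_cases h : k = "_value"
    · cases n <;> simp [objSet, trO, bSetValue, h]
    · cases n <;> simp [objSet, trO, bSetValue, h, trO_setValue r v]

theorem insert_skip (k : String) (n : TVal) (r : TObj) (h : String) (t : List String)
    (v : String) (hk : k ≠ h) :
    insertPath (TObj.cons k n r) (h :: t) v = TObj.cons k n (insertPath r (h :: t) v) := by
  match t with
  | [] =>
    simp only [insertPath, objGet?, beq_iff_eq, hk, if_false]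
    cases objGet? r h with
    | none => simp [objSet, hk]
    | some w => cases w <;> simp [objSet, hk]
  | t0 :: ts =>
    simp only [insertPath, objGet?, beq_iff_eq, hk, if_false, objSet]

theorem insert_sim : ∀ (o : TObj) (parts : List String) (v : String),
    trO (insertPath o parts v) = bInsert (trO o) parts v
  | TObj.nil, [], v => by simp [insertPath, bInsert, trO]
  | TObj.cons k n r, [], v => by cases n <;> simp [insertPath, bInsert, trO]
  | TObj.nil, [h], v => by simp [insertPath, objGet?, objSet, bInsert, trO]
  | TObj.nil, h :: r1 :: rs, v => by
    simp [insertPath, objGet?, objSet, bInsert, trO, insert_sim TObj.nil (r1 :: rs) v]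
  | TObj.cons k n r, [h], v => by
    by_cases hk : k = h
    · subst hk
      cases n with
      | s s => simp [insertPath, objGet?, objSet, bInsert, trO]
      | o d => simp [insertPath, objGet?, objSet, bInsert, trO, trO_setValue d v]
    · rw [insert_skip k n r h [] v hk]
      cases n with
      | s s =>
        conv_rhs => rw [trO, bInsert.eq_def]
        simp only [trO, beq_iff_eq, hk, if_false]
        rw [insert_sim r [h] v]
      | o d =>
        conv_rhs => rw [trO, bInsert.eq_def]
        simp only [trO, beq_iff_eq, hk, if_false]
        rw [insert_sim r [h] v]
  | TObj.cons k n r, h :: r1 :: rs, v => by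
    by_cases hk : k = h
    · subst hk
      cases n with
      | s s =>
        simp [insertPath, objGet?, objSet, bInsert, trO,
          insert_sim (TObj.cons "_value" (TVal.s s) TObj.nil) (r1 :: rs) v]
      | o d =>
        simp [insertPath, objGet?, objSet, bInsert, trO, insert_sim d (r1 :: rs) v]
    · rw [insert_skip k n r h (r1 :: rs) v hk]
      cases n with
      | s s =>
        conv_rhs => rw [trO, bInsert.eq_def]
        simp only [trO, beq_iff_eq, hk, if_false]
        rw [insert_sim r (h :: r1 :: rs) v]
      | o d =>
        conv_rhs => rw [trO, bInsert.eq_def]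
        simp only [trO, beq_iff_eq, hk, if_false]
        rw [insert_sim r (h :: r1 :: rs) v]
  termination_by o parts _ => (parts.length, sizeOf o)

theorem fold_sim : ∀ (items : List (String × String)) (acc : TObj),
    trO (items.foldl (fun a kv => insertPath a ((PySem.Str.split? kv.1 ".").getD []) kv.2) acc)
      = items.foldl (fun a kv => bInsert a ((PySem.Str.split? kv.1 ".").getD []) kv.2) (trO acc)
  | [], acc => by simp
  | kv :: rest, acc => by
    simp only [List.foldl_cons]
    rw [fold_sim rest, insert_sim]

theorem setValue_good : ∀ (d : TObj) (v : String), goodO d = true →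
    goodO (objSet d "_value" (TVal.s v)) = true
  | TObj.nil, v, _ => by simp [objSet, goodO, goodV]
  | TObj.cons k n r, v, hd => by
    simp only [goodO, Bool.and_eq_true] at hd
    by_cases h : k = "_value"
    · simp [objSet, goodO, goodV, hd.2, h]
    · simp [objSet, goodO, goodV, h, hd.1, hd.2, setValue_good r v hd.2]

theorem insert_good : ∀ (o : TObj) (parts : List String) (v : String),
    goodO o = true → "_value" ∉ parts.dropLast →
    goodO (insertPath o parts v) = true
  | o, [], v, ho, _ => by simpa [insertPath] using ho
  | TObj.nil, [h], v, _, _ => by simp [insertPath, objGet?, objSet, goodO, goodV]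
  | TObj.nil, h :: r1 :: rs, v, _, hp => by
    simp only [List.dropLast, List.mem_cons, not_or] at hp
    have hh : h ≠ "_value" := fun e => hp.1 e.symm
    have hptail : "_value" ∉ (r1 :: rs).dropLast := by
      intro hm
      cases rs with
      | nil => simp [List.dropLast] at hm
      | cons a as => exact hp.2 (by simpa [List.dropLast] using hm)
    have hrec := insert_good TObj.nil (r1 :: rs) v (by simp [goodO]) hptail
    simp [insertPath, objGet?, objSet, goodO, goodV, hrec, hh]
  | TObj.cons k n r, [h], v, ho, _ => by
    by_cases hk : k = h
    · subst hk
      cases n with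
      | s s =>
        simp only [goodO, goodV, Bool.and_eq_true] at ho
        simp [insertPath, objGet?, objSet, goodO, goodV, ho.2]
      | o d =>
        simp only [goodO, goodV, Bool.and_eq_true] at ho
        simp only [insertPath, objGet?, beq_self_eq_true, if_true]
        simp [objSet, goodO, goodV, ho.1.1, ho.2, setValue_good d v ho.1.2]
    · rw [insert_skip k n r h [] v hk]
      simp only [goodO, Bool.and_eq_true] at ho ⊢
      exact ⟨ho.1, insert_good r [h] v ho.2 (by simp [List.dropLast])⟩
  | TObj.cons k n r, h :: r1 :: rs, v, ho, hp => by
    simp only [List.dropLast, List.mem_cons, not_or] at hp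
    have hh : h ≠ "_value" := fun e => hp.1 e.symm
    have hptail : "_value" ∉ (r1 :: rs).dropLast := by
      intro hm
      cases rs with
      | nil => simp [List.dropLast] at hm
      | cons a as => exact hp.2 (by simpa [List.dropLast] using hm)
    by_cases hk : k = h
    · subst hk
      cases n with
      | s s =>
        simp only [goodO, goodV, Bool.and_eq_true] at ho
        have hrec := insert_good (TObj.cons "_value" (TVal.s s) TObj.nil) (r1 :: rs) v
          (by simp [goodO, goodV]) hptail
        simp [insertPath, objGet?, objSet, goodO, goodV, hrec, ho.2, hh]
      | o d =>
        simp only [goodO, goodV, Bool.and_eq_true] at ho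
        have hrec := insert_good d (r1 :: rs) v ho.1.2 hptail
        simp [insertPath, objGet?, objSet, goodO, goodV, hrec, ho.2, hh]
    · rw [insert_skip k n r h (r1 :: rs) v hk]
      simp only [goodO, Bool.and_eq_true] at ho ⊢
      refine ⟨ho.1, insert_good r (h :: r1 :: rs) v ho.2 ?_⟩
      simp only [List.dropLast, List.mem_cons, not_or]
      exact hp

-- a string made of the given lines, each terminated by '\n'
def linesStr (ls : List String) : String := ls.foldr (fun l acc => l ++ "\n" ++ acc) ""

theorem linesStr_cons (x : String) (ls : List String) :
    linesStr (x :: ls) = x ++ "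
" ++ linesStr ls := rfl

theorem linesStr_append (a b : List String) :
    linesStr (a ++ b) = linesStr a ++ linesStr b := by
  induction a with
  | nil => simp [linesStr]
  | cons x xs ih => simp [linesStr_cons, ih, String.append_assoc]

theorem isLeaf_sim (d : TObj) :
    bIsLeaf (trO d) = (objContains d "_value" && objSize d == 1) := by
  match d with
  | TObj.nil => simp [trO, bIsLeaf, objContains, objSize]
  | TObj.cons k v TObj.nil => cases v <;> simp [trO, bIsLeaf, objContains, objSize]
  | TObj.cons k v (TObj.cons k' v' r) =>
    cases v <;> cases v' <;> simp [trO, bIsLeaf, objContains, objSize]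

theorem leafVal_sim (d : TObj) (hg : goodO d = true)
    (hl : (objContains d "_value" && objSize d == 1) = true) :
    bLeafVal (trO d) = pyStrVal (getValue d) := by
  match d with
  | TObj.nil => simp [objContains] at hl
  | TObj.cons k v TObj.nil =>
    simp only [objContains, objSize, Bool.and_eq_true, Bool.or_eq_true, beq_iff_eq] at hl
    have hk : k = "_value" := by
      rcases hl.1 with h | h
      · exact h
      · simp at h
    subst hk
    cases v with
    | s s => simp [trO, bLeafVal, getValue, objGet?, pyStrVal]
    | o d' => simp [goodO, goodV] at hg
  | TObj.cons k v (TObj.cons k' v' r) =>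
    simp only [objContains, objSize, Bool.and_eq_true, beq_iff_eq] at hl
    omega

theorem printObj_nil (ind : Nat) : printObj TObj.nil ind = [] := by rw [printObj.eq_def]

theorem printObj_cons (k : String) (v : TVal) (rest : TObj) (ind : Nat) :
    printObj (TObj.cons k v rest) ind =
      (if k = "_value" then [] else
        match v with
        | TVal.s sv => [lineLeaf ind k sv]
        | TVal.o d =>
          if objContains d "_value" && objSize d == 1 then
            [lineLeaf ind k (pyStrVal (getValue d))]
          else
            (indentStr ind ++ k ++ ": {") :: (printObj d (ind + 1) ++ [indentStr ind ++ "},"]))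
      ++ printObj rest ind := by
  rw [printObj.eq_def]

theorem render_sim : ∀ (o : TObj) (ind : Nat), goodO o = true →
    bRender (trO o) ind = linesStr (printObj o ind)
  | TObj.nil, ind, _ => by simp [trO, bRender, printObj_nil, linesStr]
  | TObj.cons k v rest, ind, ho => by
    have hrest : goodO rest = true := by
      simp only [goodO, Bool.and_eq_true] at ho; exact ho.2
    by_cases hk : k = "_value"
    · subst hk
      cases v <;>
        simp [trO, bRender, printObj_cons, render_sim rest ind hrest]
    · cases v with
      | s s =>
        simp [trO, bRender, printObj_cons, hk, render_sim rest ind hrest,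
          linesStr_cons, lineLeaf, indentStr, escapeTs, String.append_assoc]
      | o d =>
        have hd : goodO d = true := by
          simp only [goodO, goodV, Bool.and_eq_true] at ho; exact ho.1.2
        by_cases hleaf : (objContains d "_value" && objSize d == 1) = true
        · simp [trO, bRender, printObj_cons, hk, isLeaf_sim, hleaf,
            leafVal_sim d hd hleaf, render_sim rest ind hrest,
            linesStr_cons, lineLeaf, indentStr, escapeTs, String.append_assoc]
        · have e1 : (": {
" : String) = ": {" ++ "
" := rfl
          have e2 : ("},
" : String) = "}," ++ "
" := rfl
          have hL : linesStr [indentStr ind ++ "},"] = indentStr ind ++ "}," ++ "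
" := by
            simp [linesStr]
          rw [printObj_cons]
          simp only [hk, if_false, eq_false_of_ne_true hleaf, Bool.false_eq_true,
            List.cons_append]
          rw [linesStr_cons, linesStr_append, linesStr_append, hL]
          simp only [trO, bRender, beq_iff_eq, hk, if_false, isLeaf_sim,
            render_sim d (ind + 1) hd, render_sim rest ind hrest]
          rw [if_pos (by simp [eq_false_of_ne_true hleaf]), e1, e2]
          simp [indentStr, String.append_assoc]

theorem strJoin_cons₂ (sep a b : String) (t : List String) :
    PySem.Str.join sep (a :: b :: t) = a ++ sep ++ PySem.Str.join sep (b :: t) := by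
  simp [PySem.Str.join, PySem.Chars.join_cons_cons, String.append_assoc]

theorem strJoin_single (sep a : String) : PySem.Str.join sep [a] = a := by
  simp [PySem.Str.join, PySem.Chars.join_singleton]

theorem join_lines (ls : List String) (x y : String) :
    PySem.Str.join "
" (x :: (ls ++ [y, ""])) = x ++ "
" ++ (linesStr ls ++ (y ++ "
")) := by
  induction ls generalizing x with
  | nil =>
    rw [List.nil_append, strJoin_cons₂, strJoin_cons₂, strJoin_single]
    simp [linesStr, String.append_assoc]
  | cons l ls' ih =>
    rw [List.cons_append, strJoin_cons₂, ih l, linesStr_cons]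
    simp [String.append_assoc]

theorem mem_items_foldl_insert :
    ∀ (l : List (String × String)) (d : PySem.Dict String String) (p : String × String),
    p ∈ (l.foldl (fun acc q => acc.insert q.1 q.2) d).items → p ∈ d.items ∨ p ∈ l
  | [], _, p, h => Or.inl h
  | kv :: rest, d, p, h => by
    simp only [List.foldl_cons] at h
    rcases mem_items_foldl_insert rest _ p h with h' | h'
    · rcases (PySem.Dict.mem_items_insert d kv.1 kv.2 p).mp h' with h'' | h''
      · right; simp [h'']
      · left; exact h''.1
    · right; simp [h']

theorem build_good :
    ∀ (items : List (String × String)) (acc : TObj), goodO acc = true →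
    (∀ kv ∈ items, "_value" ∉ ((PySem.Str.split? kv.1 ".").getD []).dropLast) →
    goodO (items.foldl (fun a kv => insertPath a ((PySem.Str.split? kv.1 ".").getD []) kv.2) acc) = true
  | [], acc, ha, _ => ha
  | kv :: rest, acc, ha, hp => by
    simp only [List.foldl_cons]
    exact build_good rest _ (insert_good acc _ kv.2 ha (hp kv (by simp)))
      (fun q hq => hp q (by simp [hq]))


theorem to_nested_format_spec : Claim_equal_to_nested_format := by
  intro flat_obj _ hpre
  unfold Spec_to_nested_format to_nested_format to_nested_format_alt
  have hgood : goodO (buildNested (PySem.Dict.ofList flat_obj).items) = true := by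
    apply build_good _ _ rfl
    intro kv hkv
    simp only [Pre_to_nested_format, List.all_eq_true, Bool.not_eq_true',
      List.contains_eq_mem, decide_eq_false_iff_not] at hpre
    refine hpre kv ((mem_items_foldl_insert flat_obj PySem.Dict.empty kv hkv).resolve_left ?_)
    rw [show PySem.Dict.empty.items = ([] : List (String × String)) from rfl]
    exact List.not_mem_nil
  have htr : trO (buildNested (PySem.Dict.ofList flat_obj).items)
      = (PySem.Dict.ofList flat_obj).items.foldl
          (fun acc kv => bInsert acc ((PySem.Str.split? kv.1 ".").getD []) kv.2) BEnt.nilO := by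
    simpa [trO] using fold_sim (PySem.Dict.ofList flat_obj).items TObj.nil
  rw [join_lines, ← render_sim _ 1 hgood, htr]
  simp [String.append_assoc]
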